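-- pv_equiv track=rewrite | github.com/costas-basdekis/advent-of-code-submissions | year_2019/day_20/part_a.py | parse_map_walkways
-- ===== SOURCE A (Python) =====
-- def parse_map_walkways(map_text):
--     """
--     >>> sorted(parse_map_walkways(
--     ...     "         A           \\n"
--     ...     "         A           \\n"
--     ...     "  #######.#########  \\n"
--     ...     "  #######.........#  \\n"
--     ...     "  #######.#######.#  \\n"
--     ...     "  #######.#######.#  \\n"
--     ...     "  #######.#######.#  \\n"
--     ...     "  #####  B    ###.#  \\n"
--     ...     "BC...##  C    ###.#  \\n"
--     ...     "  ##.##       ###.#  \\n"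
--     ...     "  ##...DE  F  ###.#  \\n"
--     ...     "  #####    G  ###.#  \\n"
--     ...     "  #########.#####.#  \\n"
--     ...     "DE..#######...###.#  \\n"
--     ...     "  #.#########.###.#  \\n"
--     ...     "FG..#########.....#  \\n"
--     ...     "  ###########.#####  \\n"
--     ...     "             Z       \\n"
--     ...     "             Z      \\n"
--     ... ))[:12]
--     [(2, 8), (2, 13), (2, 15), (3, 8), (3, 13), (3, 14), (3, 15), (4, 8), (4, 9), (4, 10), (5, 10), (6, 10)]
--     """
--     lines = map_text.splitlines()
--     non_empty_lines = filter(None, lines)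
--     return [
--         (x, y)
--         for y, line in enumerate(non_empty_lines)
--         for x, content in enumerate(line)
--         if content == '.'
--     ]
-- ===== SOURCE B (Python) =====
-- def parse_map_walkways(map_text):
--     result = []
--     y = 0
--     for line in map_text.splitlines():
--         if not line:
--             continue
--         x = line.find('.')
--         while x != -1:
--             result.append((x, y))
--             x = line.find('.', x + 1)
--         y += 1
--     return result
-- ===== Notes on version B (the rewrite author's own statement) =====
-- stated objective: faster
-- what changed: Replaces the nested enumerate comprehension over a filtered iterator with a single pass keeping an explicit y counter that skips empty lines, and locates dots per line by jumping with str.find instead of testing every character in Python-level code.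
import Mathlib
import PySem

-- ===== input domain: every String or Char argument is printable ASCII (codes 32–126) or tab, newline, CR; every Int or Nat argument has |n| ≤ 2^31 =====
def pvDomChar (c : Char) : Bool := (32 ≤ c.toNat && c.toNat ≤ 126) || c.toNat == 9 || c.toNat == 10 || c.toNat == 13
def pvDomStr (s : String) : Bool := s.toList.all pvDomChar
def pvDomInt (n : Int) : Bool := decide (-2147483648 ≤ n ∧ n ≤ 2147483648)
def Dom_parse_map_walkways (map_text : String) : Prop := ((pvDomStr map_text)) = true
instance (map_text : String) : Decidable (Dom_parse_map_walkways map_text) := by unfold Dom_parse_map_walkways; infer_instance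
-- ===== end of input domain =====

-- B replaces the filtered-enumerate comprehension with one pass keeping an explicit y counter
-- that skips empty lines and a str.find-jump inner scan; equal output (objective: faster,
-- constant-factor, measured).

-- ===== PORT A =====
def parse_map_walkways (map_text : String) : List (Int × Int) :=
  let lines := PySem.Str.splitlines map_text
  let non_empty_lines := lines.filter (fun l => l ≠ "")
  (PySem.List.enumerate non_empty_lines 0).foldl (fun acc yl =>
    acc ++ (PySem.List.enumerate yl.2.toList 0).foldl (fun acc2 xc =>
      acc2 ++ (if xc.2 = '.' then [(xc.1, yl.1)] else [])) []) []

-- ===== PORT B =====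
-- hand port of `line.find('.', start)` with a nonnegative start: index (-1 = none via the
-- Option match below) of the first '.' at position ≥ start; exact for a single-char needle.
-- The while loop becomes recursion on the found index.
def pvDotScan (cs : List Char) (y : Int) (start : Nat) : List (Int × Int) :=
  match h : (cs.drop start).findIdx? (fun c => c == '.') with
  | none => []
  | some j => (((start + j : Nat) : Int), y) :: pvDotScan cs y (start + j + 1)
termination_by cs.length - start
decreasing_by
  have hj : j < (cs.drop start).length := List.findIdx?_eq_some_iff_findIdx_eq.mp h |>.1
  simp [List.length_drop] at hj
  omega

def pvGoLines : List String → Int → List (Int × Int)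
  | [], _ => []
  | l :: ls, y =>
    if l = "" then pvGoLines ls y
    else pvDotScan l.toList y 0 ++ pvGoLines ls (y + 1)

def parse_map_walkways_alt (map_text : String) : List (Int × Int) :=
  pvGoLines (PySem.Str.splitlines map_text) 0

-- ===== PRECONDITION & SPEC =====
def Spec_parse_map_walkways (map_text : String) (out : List (Int × Int)) : Prop := out = parse_map_walkways_alt map_text
instance (map_text : String) (out : List (Int × Int)) : Decidable (Spec_parse_map_walkways map_text out) := by unfold Spec_parse_map_walkways; infer_instance

-- ===== CLAIM (what is proved, stated in full; the proofs are below) =====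
def Claim_equal_parse_map_walkways : Prop := ∀ (map_text : String), Dom_parse_map_walkways map_text → Spec_parse_map_walkways map_text (parse_map_walkways map_text)

-- ===== LEMMAS AND PROOFS =====

-- structural reference function: dots of a line, index counter i
def pvGDots (y : Int) : List Char → Int → List (Int × Int)
  | [], _ => []
  | c :: cs, i => if c = '.' then (i, y) :: pvGDots y cs (i + 1) else pvGDots y cs (i + 1)

theorem pvALine (y : Int) (cs : List Char) (i : Int) (acc : List (Int × Int)) :
    (PySem.List.enumerate cs i).foldl (fun acc2 xc =>
      acc2 ++ (if xc.2 = '.' then [(xc.1, y)] else [])) acc = acc ++ pvGDots y cs i := by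
  induction cs generalizing i acc with
  | nil => simp [PySem.List.enumerate_nil, pvGDots]
  | cons c cs ih =>
    simp only [PySem.List.enumerate_cons, List.foldl_cons, pvGDots, ih]
    by_cases hc : c = '.' <;> simp [hc]

theorem pvGDots_none (y : Int) (l : List Char) (i : Int)
    (h : l.findIdx? (fun c => c == '.') = none) : pvGDots y l i = [] := by
  induction l generalizing i with
  | nil => rfl
  | cons c cs ih =>
    rw [List.findIdx?_cons] at h
    by_cases hc : c = '.'
    · simp [hc] at h
    · rw [if_neg (by simp [hc]), Option.map_eq_none_iff] at h
      simp only [pvGDots, if_neg hc]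
      exact ih _ h

theorem pvGDots_some (y : Int) (l : List Char) (j : Nat) (i : Int)
    (h : l.findIdx? (fun c => c == '.') = some j) :
    pvGDots y l i = (i + j, y) :: pvGDots y (l.drop (j + 1)) (i + j + 1) := by
  induction l generalizing j i with
  | nil => simp at h
  | cons c cs ih =>
    rw [List.findIdx?_cons] at h
    by_cases hc : c = '.'
    · simp [hc] at h
      subst h
      simp [pvGDots, hc]
    · simp [hc] at h
      obtain ⟨j', hj', rfl⟩ := h
      simp only [pvGDots, if_neg hc, ih _ _ hj', List.drop_succ_cons]
      have e1 : i + 1 + (j' : Int) = i + ((j' + 1 : Nat) : Int) := by push_cast; ring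
      rw [e1]

theorem pvDotScan_eq (cs : List Char) (y : Int) :
    ∀ n start, cs.length - start ≤ n →
      pvDotScan cs y start = pvGDots y (cs.drop start) (start : Int) := by
  intro n
  induction n with
  | zero =>
    intro start hs
    have hd : cs.drop start = [] := List.drop_eq_nil_of_le (by omega)
    rw [pvDotScan]
    split
    · rw [hd, pvGDots]
    · next j h =>
      rw [hd] at h
      simp at h
  | succ n ih =>
    intro start hs
    rw [pvDotScan]
    split
    · next h => rw [pvGDots_none y _ _ h]
    · next j h =>
      have hj : j < (cs.drop start).length := List.findIdx?_eq_some_iff_findIdx_eq.mp h |>.1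
      simp only [List.length_drop] at hj
      rw [pvGDots_some y _ j _ h, ih (start + j + 1) (by omega), List.drop_drop]
      have e1 : ((start + j : Nat) : Int) = (start : Int) + (j : Int) := by push_cast; ring
      have e3 : ((start + j + 1 : Nat) : Int) = (start : Int) + (j : Int) + 1 := by push_cast; ring
      rw [e1, e3, ← Nat.add_assoc]

theorem pvTop2 (lines : List String) (y : Int) (acc : List (Int × Int)) :
    (PySem.List.enumerate (lines.filter (fun l => l ≠ "")) y).foldl (fun acc yl =>
      acc ++ pvGDots yl.1 yl.2.toList 0) acc = acc ++ pvGoLines lines y := by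
  induction lines generalizing y acc with
  | nil => simp [PySem.List.enumerate_nil, pvGoLines]
  | cons l ls ih =>
    by_cases hl : l = ""
    · rw [List.filter_cons_of_neg (by simp [hl]), pvGoLines, if_pos hl]
      exact ih y acc
    · rw [List.filter_cons_of_pos (by simp [hl]), PySem.List.enumerate_cons, List.foldl_cons,
        pvGoLines, if_neg hl]
      rw [ih, pvDotScan_eq l.toList y l.toList.length 0 (by omega)]
      simp only [List.drop_zero, Nat.cast_zero, List.append_assoc]

theorem pvTop (lines : List String) (y : Int) (acc : List (Int × Int)) :
    (PySem.List.enumerate (lines.filter (fun l => l ≠ "")) y).foldl (fun acc yl =>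
      acc ++ (PySem.List.enumerate yl.2.toList 0).foldl (fun acc2 xc =>
        acc2 ++ (if xc.2 = '.' then [(xc.1, yl.1)] else [])) []) acc
      = acc ++ pvGoLines lines y := by
  simp only [pvALine, List.nil_append]
  exact pvTop2 lines y acc

theorem parse_map_walkways_spec' : ∀ (map_text : String),
    parse_map_walkways map_text = parse_map_walkways_alt map_text := by
  intro s
  unfold parse_map_walkways parse_map_walkways_alt
  simpa using pvTop (PySem.Str.splitlines s) 0 []

-- ===== VERDICT (by name: the statement is the Claim_ definition above) =====
theorem parse_map_walkways_spec : Claim_equal_parse_map_walkways := by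
  intro s _
  unfold Spec_parse_map_walkways
  exact parse_map_walkways_spec' s
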